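-- pv_equiv track=rewrite | github.com/daedalus/libciphers | src/libciphers/__init__.py | cumulative_shift_decrypt
-- ===== SOURCE A (Python) =====
-- def cumulative_shift_decrypt(cipher: str) -> str:
--     """Cumulative shift - each letter shifted by running total"""
--     result = ""
--     total = 0
--     for c in cipher:
--         if c.isalpha():
--             total = (total + 1) % 26
--             result += chr((ord(c) - ord("A") - total) % 26 + ord("A"))
--         else:
--             result += c
--     return result
-- ===== SOURCE B (Python) =====
-- def cumulative_shift_decrypt(cipher: str) -> str:
--     """Cumulative shift - each letter shifted by running total"""
--     totals = []
--     t = 0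
--     for c in cipher:
--         t += c.isalpha()
--         totals.append(t)
--     return "".join(
--         chr((ord(c) - ord("A") - t % 26) % 26 + ord("A")) if c.isalpha() else c
--         for c, t in zip(cipher, totals)
--     )
-- ===== Notes on version B (the rewrite author's own statement) =====
-- stated objective: alternative
-- what changed: B splits A's single counter-maintaining loop into two passes: it first builds a prefix-count table of alphabetic characters, then maps a stateless per-character transform over the string zipped with that table and joins the result.
import Mathlib
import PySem

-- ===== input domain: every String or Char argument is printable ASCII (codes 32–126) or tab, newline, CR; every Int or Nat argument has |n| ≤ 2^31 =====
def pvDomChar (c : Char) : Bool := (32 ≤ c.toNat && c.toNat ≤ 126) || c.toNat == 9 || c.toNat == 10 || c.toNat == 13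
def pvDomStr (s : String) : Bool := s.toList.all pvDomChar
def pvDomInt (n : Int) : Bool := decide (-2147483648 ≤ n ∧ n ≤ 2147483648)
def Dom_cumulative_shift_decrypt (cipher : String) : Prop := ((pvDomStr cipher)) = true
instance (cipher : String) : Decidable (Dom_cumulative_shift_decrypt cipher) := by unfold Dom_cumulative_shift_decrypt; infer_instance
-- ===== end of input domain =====

-- B replaces A's single counter-carrying loop by two passes: a prefix-count table of
-- alphabetic characters, then a stateless per-character transform joined at the end (objective: alternative).


-- ===== PORT A =====
-- one loop: result string and running total, total updated then used
def csdAStep (st : List Char × Int) (c : Char) : List Char × Int :=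
  if PySem.Chars.isalpha c then
    let t := PySem.Int.mod (st.2 + 1) 26
    (st.1 ++ [Char.ofNat ((PySem.Int.mod ((c.toNat : Int) - 65 - t) 26 + 65).toNat)], t)
  else
    (st.1 ++ [c], st.2)

def cumulative_shift_decrypt (cipher : String) : String :=
  String.mk (cipher.toList.foldl csdAStep ([], 0)).1

-- ===== PORT B =====
-- pass 1: prefix counts of alphabetic characters
def csdTotals (cs : List Char) (t : Nat) : List Nat :=
  match cs with
  | [] => []
  | c :: rest =>
      let t' := t + (if PySem.Chars.isalpha c then 1 else 0)
      t' :: csdTotals rest t'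

-- pass 2: stateless per-character transform
def csdTrans (p : Char × Nat) : Char :=
  if PySem.Chars.isalpha p.1 then
    Char.ofNat ((PySem.Int.mod ((p.1.toNat : Int) - 65 - ((p.2 % 26 : Nat) : Int)) 26 + 65).toNat)
  else p.1

def cumulative_shift_decrypt_alt (cipher : String) : String :=
  String.mk ((cipher.toList.zip (csdTotals cipher.toList 0)).map csdTrans)

-- ===== PRECONDITION & SPEC =====
def Spec_cumulative_shift_decrypt (cipher : String) (out : String) : Prop := out = cumulative_shift_decrypt_alt cipher
instance (cipher : String) (out : String) : Decidable (Spec_cumulative_shift_decrypt cipher out) := by unfold Spec_cumulative_shift_decrypt; infer_instance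

-- ===== CLAIM (what is proved, stated in full; the proofs are below) =====
def Claim_equal_cumulative_shift_decrypt : Prop := ∀ (cipher : String), Dom_cumulative_shift_decrypt cipher → Spec_cumulative_shift_decrypt cipher (cumulative_shift_decrypt cipher)

-- ===== LEMMAS AND PROOFS =====

-- A's running total after each prefix equals that prefix's alpha count mod 26;
-- relating the two loops by induction with both accumulators generalized.
theorem csd_loop (cs : List Char) : ∀ (acc : List Char) (n : Nat),
    (cs.foldl csdAStep (acc, ((n % 26 : Nat) : Int))).1
      = acc ++ (cs.zip (csdTotals cs n)).map csdTrans := by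
  induction cs with
  | nil => intro acc n; simp [csdTotals]
  | cons c rest ih =>
    intro acc n
    by_cases h : PySem.Chars.isalpha c = true
    · have hmod : PySem.Int.mod (((n % 26 : Nat) : Int) + 1) 26 = (((n + 1) % 26 : Nat) : Int) := by
        have : (((n % 26 : Nat) : Int) + 1) = (((n % 26 + 1 : Nat)) : Int) := by push_cast; ring
        rw [this, show (26:Int) = ((26:Nat):Int) from rfl, PySem.Int.mod_natCast]
        congr 1
        omega
      simp only [List.foldl, csdAStep, h, if_true, csdTotals, List.zip_cons_cons, List.map_cons]
      rw [hmod, ih]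
      simp [csdTrans, h, List.append_assoc]
    · simp only [List.foldl, csdAStep, h, if_false, csdTotals, List.zip_cons_cons, List.map_cons,
        Bool.false_eq_true]
      rw [ih]
      simp [csdTrans, h, List.append_assoc]

-- ===== VERDICT (by name: the statement is the Claim_ definition above) =====
theorem cumulative_shift_decrypt_spec : Claim_equal_cumulative_shift_decrypt := by
  intro cipher _
  unfold Spec_cumulative_shift_decrypt cumulative_shift_decrypt cumulative_shift_decrypt_alt
  exact congrArg String.mk (by simpa using csd_loop cipher.toList [] 0)
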